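-- pv_equiv track=rewrite | github.com/pkang0831/fromFatToFit_v2 | scripts/seo_retrofit/apply_keyword_research.py | update_posts_ts_keywords
-- ===== SOURCE A (Python) =====
-- def js_string(s: str) -> str:
--     """Render a Python string as a JS single- or double-quoted literal preserving apostrophes."""
--     if "'" in s and '"' not in s:
--         return f'"{s}"'
--     if "'" in s:
--         return "'" + s.replace("'", "\\'") + "'"
--     return f"'{s}'"
--
-- def update_posts_ts_keywords(text: str, slug: str, new_primary: str, new_secondary: list[str]) -> tuple[str, str]:
--     """Replace the keywords: [...] array for a given slug.
--
--     Two-step scan (avoids pathological regex backtracking on 6000-line files):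
--     1. Locate the slug line.
--     2. From that offset, search forward line-by-line for `    keywords: [`
--        and then for the matching `    ],` terminator.
--     """
--     slug_line = f"    slug: '{slug}',"
--     slug_idx = text.find(slug_line)
--     if slug_idx == -1:
--         return text, "slug-or-keywords-not-found"
--
--     keywords_marker = "    keywords: ["
--     kw_start = text.find(keywords_marker, slug_idx)
--     if kw_start == -1:
--         return text, "slug-or-keywords-not-found"
--
--     # Stop looking for keywords if we've already passed the next slug line;
--     # that would mean THIS slug's entry doesn't have a keywords block.
--     next_slug_idx = text.find("    slug: '", slug_idx + len(slug_line))
--     if next_slug_idx != -1 and kw_start > next_slug_idx: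
--         return text, "slug-or-keywords-not-found"
--
--     # Find the closing `    ],` for this keywords array.
--     term = text.find("\n    ],", kw_start)
--     if term == -1:
--         return text, "slug-or-keywords-not-found"
--     # The full old block spans from kw_start to end of `    ],\n`.
--     block_end = term + len("\n    ],\n")
--
--     # Compose new block.
--     new_lines = [f"      {js_string(kw)}" for kw in [new_primary, *new_secondary]]
--     new_block = keywords_marker + "\n" + ",\n".join(new_lines) + ",\n    ],\n"
--
--     if text[kw_start:block_end] == new_block:
--         return text, "no-op"
--
--     new_text = text[:kw_start] + new_block + text[block_end:]
--     return new_text, "updated"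
-- ===== SOURCE B (Python) =====
-- def js_string(s: str) -> str:
--     """Render a Python string as a JS single- or double-quoted literal preserving apostrophes."""
--     if "'" in s and '"' not in s:
--         return f'"{s}"'
--     if "'" in s:
--         return "'" + s.replace("'", "\\'") + "'"
--     return f"'{s}'"
--
--
-- def _render_block(new_primary: str, new_secondary: list[str]) -> str:
--     """Build the replacement keywords block, one trailing-comma line at a time."""
--     block = "    keywords: [\n"
--     for kw in [new_primary] + list(new_secondary):
--         block += "      " + js_string(kw) + ",\n"
--     return block + "    ],\n"
--
--
-- def update_posts_ts_keywords(text: str, slug: str, new_primary: str, new_secondary: list[str]) -> tuple[str, str]: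
--     """Single left-to-right walk over the text with a 3-state machine:
--     state 0 seeks the slug line, state 1 seeks the keywords opener while
--     guarding against running into the next entry's slug line, state 2 seeks
--     the closing `    ],` and splices the freshly rendered block in."""
--     slug_line = f"    slug: '{slug}',"
--     miss = (text, "slug-or-keywords-not-found")
--     n = len(text)
--     state = 0
--     j = slug_idx = kw_start = 0
--     while j < n:
--         if state == 0:
--             if text.startswith(slug_line, j):
--                 slug_idx, state = j, 1
--                 continue
--         elif state == 1:
--             if text.startswith("    keywords: [", j):
--                 kw_start, state = j, 2
--                 continue
--             if j >= slug_idx + len(slug_line) and text.startswith("    slug: '", j):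
--                 return miss
--         else:
--             if text.startswith("\n    ],", j):
--                 new_block = _render_block(new_primary, new_secondary)
--                 end = j + 8
--                 if text[kw_start:end] == new_block:
--                     return text, "no-op"
--                 return text[:kw_start] + new_block + text[end:], "updated"
--         j += 1
--     return miss
-- ===== Notes on version B (the rewrite author's own statement) =====
-- stated objective: alternative
-- what changed: B replaces A's staged text.find substring searches and absolute-offset arithmetic with a single left-to-right index walk driven by a 3-state machine (seek slug line / seek keywords opener with next-slug guard / seek terminator) using startswith at each position and splicing when the terminator state fires.
import Mathlib
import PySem

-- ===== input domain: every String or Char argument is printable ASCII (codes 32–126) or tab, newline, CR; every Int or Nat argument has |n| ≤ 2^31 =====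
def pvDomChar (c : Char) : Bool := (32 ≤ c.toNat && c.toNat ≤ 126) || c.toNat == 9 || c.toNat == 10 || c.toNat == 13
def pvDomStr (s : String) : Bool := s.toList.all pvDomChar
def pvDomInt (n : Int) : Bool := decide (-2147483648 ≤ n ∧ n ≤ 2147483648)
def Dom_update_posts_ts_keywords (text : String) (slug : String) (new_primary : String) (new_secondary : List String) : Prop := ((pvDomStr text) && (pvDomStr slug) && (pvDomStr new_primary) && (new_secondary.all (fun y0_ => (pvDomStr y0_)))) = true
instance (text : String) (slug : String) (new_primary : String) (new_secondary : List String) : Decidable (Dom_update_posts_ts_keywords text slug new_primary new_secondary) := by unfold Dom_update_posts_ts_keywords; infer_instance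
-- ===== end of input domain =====

-- B replaces A's staged text.find substring searches by a single left-to-right index walk with a
-- 3-state machine (seek slug line / seek keywords opener with next-slug guard / seek terminator);
-- same results (objective: alternative).


-- shared helper js_string (verbatim in both Python sources), on List Char
def pvJsString (s : List Char) : List Char :=
  if PySem.Chars.isIn ['\''] s && !(PySem.Chars.isIn ['"'] s) then
    '"' :: (s ++ ['"'])
  else if PySem.Chars.isIn ['\''] s then
    '\'' :: (PySem.Chars.replace s ['\''] ['\\', '\''] ++ ['\''])
  else
    '\'' :: (s ++ ['\''])

def pvKwMarker : List Char := "    keywords: [".toList      -- "    keywords: ["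
def pvSlugPrefix : List Char := "    slug: '".toList        -- "    slug: '"
def pvTermMarker : List Char := "\n    ],".toList           -- "\n    ],"

-- ===== PORT A =====
def update_posts_ts_keywords (text : String) (slug : String) (new_primary : String) (new_secondary : List String) : String × String :=
  let t := text.toList
  let slug_line := pvSlugPrefix ++ slug.toList ++ ['\'', ',']          -- f"    slug: '{slug}',"
  let slug_idx := PySem.Chars.find t slug_line
  if slug_idx = -1 then (text, "slug-or-keywords-not-found")
  else
    let kw_start := PySem.Chars.findFrom t pvKwMarker slug_idx         -- text.find(marker, slug_idx)
    if kw_start = -1 then (text, "slug-or-keywords-not-found")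
    else
      let next_slug_idx := PySem.Chars.findFrom t pvSlugPrefix (slug_idx + (slug_line.length : Int))
      if next_slug_idx ≠ -1 ∧ kw_start > next_slug_idx then (text, "slug-or-keywords-not-found")
      else
        let term := PySem.Chars.findFrom t pvTermMarker kw_start       -- text.find("\n    ],", kw_start)
        if term = -1 then (text, "slug-or-keywords-not-found")
        else
          let block_end := term + 8                                    -- len("\n    ],\n") = 8
          let new_lines := (new_primary :: new_secondary).map (fun kw => "      ".toList ++ pvJsString kw.toList)
          let new_block := pvKwMarker ++ '\n' :: (PySem.Chars.join [',', '\n'] new_lines ++ ",\n    ],\n".toList)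
          if PySem.List.slice t (some kw_start) (some block_end) = new_block then (text, "no-op")
          else (String.ofList (PySem.List.slice t none (some kw_start) ++ new_block ++ PySem.List.slice t (some block_end) none), "updated")

-- ===== PORT B =====
-- _render_block: accumulate one trailing-comma line at a time
def pvRenderBlock (new_primary : List Char) (new_secondary : List (List Char)) : List Char :=
  ((new_primary :: new_secondary).foldl
      (fun block kw => block ++ ("      ".toList ++ pvJsString kw ++ [',', '\n']))
      "    keywords: [\n".toList)
    ++ "    ],\n".toList

-- the while loop of B: one index walk with a 3-state machine ('continue' = recurse without j+1)
def pvScan (t : List Char) (slug_line : List Char) (new_primary : String)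
    (new_secondary : List String) (text : String)
    (state j slug_idx kw_start : Nat) : String × String :=
  if h : j < t.length then
    if state = 0 then
      if slug_line <+: t.drop j then
        pvScan t slug_line new_primary new_secondary text 1 j j kw_start
      else pvScan t slug_line new_primary new_secondary text 0 (j+1) slug_idx kw_start
    else if state = 1 then
      if pvKwMarker <+: t.drop j then
        pvScan t slug_line new_primary new_secondary text 2 j slug_idx j
      else if slug_idx + slug_line.length ≤ j ∧ pvSlugPrefix <+: t.drop j then
        (text, "slug-or-keywords-not-found")
      else pvScan t slug_line new_primary new_secondary text 1 (j+1) slug_idx kw_start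
    else
      if pvTermMarker <+: t.drop j then
        let new_block := pvRenderBlock new_primary.toList (new_secondary.map String.toList)
        if PySem.List.slice t (some (kw_start : Int)) (some ((j + 8 : Nat) : Int)) = new_block then
          (text, "no-op")
        else
          (String.ofList (PySem.List.slice t none (some (kw_start : Int)) ++ new_block ++
            PySem.List.slice t (some ((j + 8 : Nat) : Int)) none), "updated")
      else pvScan t slug_line new_primary new_secondary text 2 (j+1) slug_idx kw_start
  else (text, "slug-or-keywords-not-found")
termination_by (t.length - j) * 3 + (2 - state)
decreasing_by all_goals omega

def update_posts_ts_keywords_alt (text : String) (slug : String) (new_primary : String) (new_secondary : List String) : String × String :=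
  pvScan text.toList (pvSlugPrefix ++ slug.toList ++ ['\'', ',']) new_primary new_secondary text 0 0 0 0

-- ===== PRECONDITION & SPEC =====
def Spec_update_posts_ts_keywords (text : String) (slug : String) (new_primary : String) (new_secondary : List String) (out : String × String) : Prop := out = update_posts_ts_keywords_alt text slug new_primary new_secondary
instance (text : String) (slug : String) (new_primary : String) (new_secondary : List String) (out : String × String) : Decidable (Spec_update_posts_ts_keywords text slug new_primary new_secondary out) := by unfold Spec_update_posts_ts_keywords; infer_instance

-- ===== CLAIM (what is proved, stated in full; the proofs are below) =====
def Claim_equal_update_posts_ts_keywords : Prop := ∀ (text : String) (slug : String) (new_primary : String) (new_secondary : List String), Dom_update_posts_ts_keywords text slug new_primary new_secondary → Spec_update_posts_ts_keywords text slug new_primary new_secondary (update_posts_ts_keywords text slug new_primary new_secondary)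

-- ===== LEMMAS AND PROOFS =====

-- glue facts about Chars.find, derived from the PySem spec lemmas (no induction over find itself)
theorem pv_find_nil (pat : List Char) (h : pat ≠ []) : PySem.Chars.find [] pat = -1 := by
  rw [PySem.Chars.find_eq_neg_one_iff]
  intro hin; exact h (List.eq_nil_of_infix_nil hin)

theorem pv_find_eq_of (l pat : List Char) (k : Nat) (hk : pat <+: l.drop k)
    (hmin : ∀ i < k, ¬ pat <+: l.drop i) : PySem.Chars.find l pat = (k : Int) := by
  have hin : pat <:+: l := hk.isInfix.trans (List.drop_suffix k l).isInfix
  have h0 : 0 ≤ PySem.Chars.find l pat := (PySem.Chars.find_nonneg_iff l pat).2 hin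
  obtain ⟨hp, hm⟩ := PySem.Chars.find_spec h0
  have h1 : ¬ (PySem.Chars.find l pat).toNat < k := fun hlt => hmin _ hlt hp
  have h2 : ¬ k < (PySem.Chars.find l pat).toNat := fun hlt => hm k hlt hk
  omega

theorem pv_find_zero (l pat : List Char) (h : pat <+: l) : PySem.Chars.find l pat = 0 := by
  have := pv_find_eq_of l pat 0 (by simpa using h) (by omega)
  simpa using this

theorem pv_find_drop_succ (t pat : List Char) (j : Nat) (hj : j < t.length)
    (h : ¬ pat <+: t.drop j) :
    PySem.Chars.find (t.drop j) pat =
      if PySem.Chars.find (t.drop (j+1)) pat = -1 then -1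
      else PySem.Chars.find (t.drop (j+1)) pat + 1 := by
  have hd : t.drop j = t[j] :: t.drop (j+1) := List.drop_eq_getElem_cons hj
  split
  · next hneg =>
    rw [PySem.Chars.find_eq_neg_one_iff] at hneg ⊢
    intro hin
    obtain ⟨i, hi⟩ := (PySem.Chars.exists_prefix_drop_iff_isIn pat (t.drop j)).2
      ((PySem.Chars.isIn_iff_infix pat (t.drop j)).2 hin)
    cases i with
    | zero => exact h (by simpa using hi)
    | succ i' =>
      rw [hd, List.drop_succ_cons] at hi
      exact hneg (hi.isInfix.trans (List.drop_suffix i' (t.drop (j+1))).isInfix)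
  · next hpos =>
    have h0 : 0 ≤ PySem.Chars.find (t.drop (j+1)) pat := by
      have := PySem.Chars.neg_one_le_find (t.drop (j+1)) pat; omega
    obtain ⟨hp, hm⟩ := PySem.Chars.find_spec h0
    have heq := pv_find_eq_of (t.drop j) pat ((PySem.Chars.find (t.drop (j+1)) pat).toNat + 1)
      (by rw [hd, List.drop_succ_cons]; exact hp)
      (by
        intro i hi
        cases i with
        | zero => simpa using h
        | succ i' =>
          rw [hd, List.drop_succ_cons]
          exact hm i' (by omega))
    rw [heq]; omega


theorem pv_peel_iff (t pat : List Char) (j : Nat) (hj : j < t.length) (h : ¬ pat <+: t.drop j) :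
    (PySem.Chars.find (t.drop (j+1)) pat = -1 ↔ PySem.Chars.find (t.drop j) pat = -1)
    ∧ (¬ PySem.Chars.find (t.drop (j+1)) pat = -1 →
        (j+1) + (PySem.Chars.find (t.drop (j+1)) pat).toNat
          = j + (PySem.Chars.find (t.drop j) pat).toNat) := by
  have hpeel := pv_find_drop_succ t pat j hj h
  have h0 := PySem.Chars.neg_one_le_find (t.drop (j+1)) pat
  refine ⟨⟨fun hh => by rw [hpeel, if_pos hh], fun hh => ?_⟩, fun hne => by rw [hpeel, if_neg hne]; omega⟩
  by_contra hne
  rw [hpeel, if_neg hne] at hh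
  omega

-- RHS shapes of the state-1 and state-2 walks, used only in the proofs below
def pvRHS1 (t sl : List Char) (np : String) (ns : List String) (text : String)
    (si : Nat) (K P : Int) (j m : Nat) : String × String :=
  if K = -1 then (text, "slug-or-keywords-not-found")
  else if P ≠ -1 ∧ m + P.toNat < j + K.toNat then (text, "slug-or-keywords-not-found")
  else pvScan t sl np ns text 2 (j + K.toNat) si (j + K.toNat)

def pvRHS2 (t : List Char) (np : String) (ns : List String) (text : String)
    (ks : Nat) (T : Int) (j : Nat) : String × String :=
  if T = -1 then (text, "slug-or-keywords-not-found")
  else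
    let new_block := pvRenderBlock np.toList (ns.map String.toList)
    if PySem.List.slice t (some (ks : Int)) (some ((j + T.toNat + 8 : Nat) : Int)) = new_block then
      (text, "no-op")
    else
      (String.ofList (PySem.List.slice t none (some (ks : Int)) ++ new_block ++
        PySem.List.slice t (some ((j + T.toNat + 8 : Nat) : Int)) none), "updated")

theorem pvRHS1_congr (t sl : List Char) (np : String) (ns : List String) (text : String)
    (si : Nat) (K₁ K₂ P₁ P₂ : Int) (j₁ m₁ j₂ m₂ : Nat)
    (hK : K₁ = -1 ↔ K₂ = -1) (hKv : ¬K₁ = -1 → j₁ + K₁.toNat = j₂ + K₂.toNat)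
    (hP : P₁ = -1 ↔ P₂ = -1) (hPv : ¬P₁ = -1 → m₁ + P₁.toNat = m₂ + P₂.toNat) :
    pvRHS1 t sl np ns text si K₁ P₁ j₁ m₁ = pvRHS1 t sl np ns text si K₂ P₂ j₂ m₂ := by
  unfold pvRHS1
  by_cases h1 : K₁ = -1
  · simp [h1, hK.1 h1]
  · have h2 : ¬K₂ = -1 := fun h => h1 (hK.2 h)
    have hj := hKv h1
    rw [if_neg h1, if_neg h2, hj]
    by_cases h3 : P₁ = -1
    · simp [h3, hP.1 h3]
    · have h4 : ¬P₂ = -1 := fun h => h3 (hP.2 h)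
      rw [hPv h3]
      simp [h3, h4]

theorem pvRHS2_congr (t : List Char) (np : String) (ns : List String) (text : String)
    (ks : Nat) (T₁ T₂ : Int) (j₁ j₂ : Nat)
    (hT : T₁ = -1 ↔ T₂ = -1) (hTv : ¬T₁ = -1 → j₁ + T₁.toNat = j₂ + T₂.toNat) :
    pvRHS2 t np ns text ks T₁ j₁ = pvRHS2 t np ns text ks T₂ j₂ := by
  unfold pvRHS2
  by_cases h1 : T₁ = -1
  · simp [h1, hT.1 h1]
  · have h2 : ¬T₂ = -1 := fun h => h1 (hT.2 h)
    rw [if_neg h1, if_neg h2, hTv h1]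

-- state-0 walk = jump to the first slug-line occurrence
theorem pv_scan0_eq (t sl : List Char) (np : String) (ns : List String) (text : String)
    (hsl : sl ≠ []) (j si ks : Nat) :
    pvScan t sl np ns text 0 j si ks =
      if PySem.Chars.find (t.drop j) sl = -1 then (text, "slug-or-keywords-not-found")
      else pvScan t sl np ns text 1 (j + (PySem.Chars.find (t.drop j) sl).toNat)
             (j + (PySem.Chars.find (t.drop j) sl).toNat) ks := by
  have hbase : ∀ j, t.length ≤ j →
      PySem.Chars.find (t.drop j) sl = -1 := by
    intro j hge
    rw [List.drop_eq_nil_of_le hge, pv_find_nil sl hsl]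
  suffices H : ∀ fuel j, t.length - j ≤ fuel → ∀ si ks,
      pvScan t sl np ns text 0 j si ks =
        if PySem.Chars.find (t.drop j) sl = -1 then (text, "slug-or-keywords-not-found")
        else pvScan t sl np ns text 1 (j + (PySem.Chars.find (t.drop j) sl).toNat)
               (j + (PySem.Chars.find (t.drop j) sl).toNat) ks by
    exact H _ j le_rfl si ks
  intro fuel
  induction fuel with
  | zero =>
    intro j hle si ks
    have hge : t.length ≤ j := by omega
    rw [pvScan, dif_neg (by omega : ¬ j < t.length), if_pos (hbase j hge)]
  | succ f ih =>
    intro j hle si ks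
    by_cases hj : j < t.length
    · rw [pvScan, dif_pos hj]
      simp only [reduceIte]
      by_cases hpre : sl <+: t.drop j
      · rw [if_pos hpre, pv_find_zero _ _ hpre,
            if_neg (by norm_num : ¬ (0 : Int) = -1)]
        norm_num
      · rw [if_neg hpre, ih (j+1) (by omega) si ks,
            pv_find_drop_succ t sl j hj hpre]
        by_cases hfn : PySem.Chars.find (t.drop (j+1)) sl = -1
        · simp [hfn]
        · have h0 : 0 ≤ PySem.Chars.find (t.drop (j+1)) sl := by
            have := PySem.Chars.neg_one_le_find (t.drop (j+1)) sl; omega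
          simp only [if_neg hfn]
          rw [if_neg (show ¬ (PySem.Chars.find (t.drop (j+1)) sl + 1 = -1) by omega)]
          have harg : j + (PySem.Chars.find (t.drop (j+1)) sl + 1).toNat
              = j + 1 + (PySem.Chars.find (t.drop (j+1)) sl).toNat := by omega
          rw [harg]
    · rw [pvScan, dif_neg hj, if_pos (hbase j (by omega))]

-- state-1 walk = jump to the first keywords-opener occurrence, guarded by the next slug line
theorem pv_scan1_eq (t sl : List Char) (np : String) (ns : List String) (text : String)
    (j si ks : Nat) :
    pvScan t sl np ns text 1 j si ks =
      pvRHS1 t sl np ns text si (PySem.Chars.find (t.drop j) pvKwMarker)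
        (PySem.Chars.find (t.drop (max j (si + sl.length))) pvSlugPrefix)
        j (max j (si + sl.length)) := by
  have hkwne : pvKwMarker ≠ ([] : List Char) := by decide
  suffices H : ∀ fuel j, t.length - j ≤ fuel → ∀ ks,
      pvScan t sl np ns text 1 j si ks =
        pvRHS1 t sl np ns text si (PySem.Chars.find (t.drop j) pvKwMarker)
          (PySem.Chars.find (t.drop (max j (si + sl.length))) pvSlugPrefix)
          j (max j (si + sl.length)) by
    exact H _ j le_rfl ks
  intro fuel
  induction fuel with
  | zero =>
    intro j hle ks
    have hge : t.length ≤ j := by omega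
    rw [pvScan, dif_neg (by omega : ¬ j < t.length)]
    unfold pvRHS1
    rw [List.drop_eq_nil_of_le hge, pv_find_nil _ hkwne, if_pos rfl]
  | succ f ih =>
    intro j hle ks
    by_cases hj : j < t.length
    · rw [pvScan, dif_pos hj, if_neg (by norm_num : ¬ (1 : Nat) = 0), if_pos rfl]
      by_cases hkw : pvKwMarker <+: t.drop j
      · rw [if_pos hkw]
        unfold pvRHS1
        rw [pv_find_zero _ _ hkw, if_neg (by norm_num : ¬ (0 : Int) = -1)]
        have hmge : j ≤ max j (si + sl.length) := Nat.le_max_left _ _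
        have hg : ¬ (PySem.Chars.find (t.drop (max j (si + sl.length))) pvSlugPrefix ≠ -1 ∧
            max j (si + sl.length) +
              (PySem.Chars.find (t.drop (max j (si + sl.length))) pvSlugPrefix).toNat
              < j + (0 : Int).toNat) := by
          rintro ⟨-, hlt⟩
          omega
        rw [if_neg hg]
        norm_num
      · rw [if_neg hkw]
        by_cases hguard : si + sl.length ≤ j ∧ pvSlugPrefix <+: t.drop j
        · rw [if_pos hguard]
          obtain ⟨hth, hsp⟩ := hguard
          unfold pvRHS1
          rw [Nat.max_eq_left hth, pv_find_zero _ _ hsp,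
              pv_find_drop_succ t pvKwMarker j hj hkw]
          have h0 := PySem.Chars.neg_one_le_find (t.drop (j+1)) pvKwMarker
          by_cases hkn : PySem.Chars.find (t.drop (j+1)) pvKwMarker = -1
          · have hcond : (if PySem.Chars.find (t.drop (j+1)) pvKwMarker = -1 then (-1 : Int)
                else PySem.Chars.find (t.drop (j+1)) pvKwMarker + 1) = -1 := by rw [if_pos hkn]
            rw [if_pos hcond]
          · rw [if_neg hkn,
                if_neg (show ¬ (PySem.Chars.find (t.drop (j+1)) pvKwMarker + 1 = -1) by omega)]
            have hg : (0 : Int) ≠ -1 ∧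
                j + (0 : Int).toNat < j + (PySem.Chars.find (t.drop (j+1)) pvKwMarker + 1).toNat :=
              ⟨by norm_num, by omega⟩
            rw [if_pos hg]
        · rw [if_neg hguard, ih (j+1) (by omega) ks]
          have hKfacts := pv_peel_iff t pvKwMarker j hj hkw
          by_cases hth : si + sl.length ≤ j
          · have hnsp : ¬ pvSlugPrefix <+: t.drop j := fun hsp => hguard ⟨hth, hsp⟩
            have hPfacts := pv_peel_iff t pvSlugPrefix j hj hnsp
            rw [Nat.max_eq_left (show si + sl.length ≤ j + 1 by omega), Nat.max_eq_left hth]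
            exact pvRHS1_congr t sl np ns text si _ _ _ _ _ _ _ _
              hKfacts.1 hKfacts.2 hPfacts.1 hPfacts.2
          · rw [Nat.max_eq_right (show j + 1 ≤ si + sl.length by omega),
                Nat.max_eq_right (show j ≤ si + sl.length by omega)]
            exact pvRHS1_congr t sl np ns text si _ _ _ _ _ _ _ _
              hKfacts.1 hKfacts.2 Iff.rfl (fun _ => rfl)
    · rw [pvScan, dif_neg hj]
      unfold pvRHS1
      rw [List.drop_eq_nil_of_le (by omega), pv_find_nil _ hkwne, if_pos rfl]

-- state-2 walk = jump to the first terminator occurrence and splice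
theorem pv_scan2_eq (t sl : List Char) (np : String) (ns : List String) (text : String)
    (j si ks : Nat) :
    pvScan t sl np ns text 2 j si ks =
      pvRHS2 t np ns text ks (PySem.Chars.find (t.drop j) pvTermMarker) j := by
  have htne : pvTermMarker ≠ ([] : List Char) := by decide
  suffices H : ∀ fuel j, t.length - j ≤ fuel →
      pvScan t sl np ns text 2 j si ks =
        pvRHS2 t np ns text ks (PySem.Chars.find (t.drop j) pvTermMarker) j by
    exact H _ j le_rfl
  intro fuel
  induction fuel with
  | zero =>
    intro j hle
    have hge : t.length ≤ j := by omega
    rw [pvScan, dif_neg (by omega : ¬ j < t.length)]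
    unfold pvRHS2
    rw [List.drop_eq_nil_of_le hge, pv_find_nil _ htne, if_pos rfl]
  | succ f ih =>
    intro j hle
    by_cases hj : j < t.length
    · rw [pvScan, dif_pos hj, if_neg (by norm_num : ¬ (2 : Nat) = 0),
          if_neg (by norm_num : ¬ (2 : Nat) = 1)]
      by_cases hterm : pvTermMarker <+: t.drop j
      · rw [if_pos hterm]
        unfold pvRHS2
        rw [pv_find_zero _ _ hterm, if_neg (by norm_num : ¬ (0 : Int) = -1)]
        norm_num
      · rw [if_neg hterm, ih (j+1) (by omega)]
        have hTfacts := pv_peel_iff t pvTermMarker j hj hterm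
        exact pvRHS2_congr t np ns text ks _ _ _ _ hTfacts.1
          (fun hne => hTfacts.2 hne)
    · rw [pvScan, dif_neg hj]
      unfold pvRHS2
      rw [List.drop_eq_nil_of_le (by omega), pv_find_nil _ htne, if_pos rfl]

theorem pv_join_sep (sep : List Char) (h : List Char → List Char) (x : List Char) (l : List (List Char)) :
    PySem.Chars.join sep ((x :: l).map h) ++ sep = ((x :: l).map (fun a => h a ++ sep)).flatten := by
  induction l generalizing x with
  | nil => simp [PySem.Chars.join_singleton]
  | cons y ys ih =>
    have := ih y
    simp only [List.map_cons] at this ⊢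
    rw [PySem.Chars.join_cons_cons, List.flatten_cons, List.append_assoc, List.append_assoc, ← this]
    simp

theorem pv_block_eq (x : List Char) (l : List (List Char)) :
    pvKwMarker ++ '\n' :: (PySem.Chars.join [',', '\n'] ((x :: l).map (fun kw => "      ".toList ++ pvJsString kw)) ++ ",\n    ],\n".toList)
      = pvRenderBlock x l := by
  have hj := pv_join_sep [',', '\n'] (fun kw => "      ".toList ++ pvJsString kw) x l
  rw [pvRenderBlock, List.foldl_append_eq_append,
      show (",\n    ],\n".toList : List Char) = [',', '\n'] ++ "    ],\n".toList from by decide,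
      show ("    keywords: [\n".toList : List Char) = pvKwMarker ++ ['\n'] from by decide,
      ← List.append_assoc, hj]
  simp [List.append_assoc]

theorem pv_main (text slug new_primary : String) (new_secondary : List String) :
    update_posts_ts_keywords text slug new_primary new_secondary
      = update_posts_ts_keywords_alt text slug new_primary new_secondary := by
  unfold update_posts_ts_keywords update_posts_ts_keywords_alt
  set t := text.toList with ht
  set sl := pvSlugPrefix ++ slug.toList ++ ['\'', ','] with hslq
  have hslne : sl ≠ [] := by rw [hslq]; simp [pvSlugPrefix]
  rw [pv_scan0_eq t sl new_primary new_secondary text hslne 0 0 0, List.drop_zero]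
  by_cases h1 : PySem.Chars.find t sl = -1
  · simp [h1]
  · have h0 : 0 ≤ PySem.Chars.find t sl := by
      have := PySem.Chars.neg_one_le_find t sl; omega
    have hi : PySem.Chars.find t sl = ((PySem.Chars.find t sl).toNat : Int) :=
      (Int.toNat_of_nonneg h0).symm
    set s := (PySem.Chars.find t sl).toNat with hsdef
    have hjle : s ≤ t.length := by
      have := PySem.Chars.find_le_length t sl; omega
    have hpre : sl <+: t.drop s := (PySem.Chars.find_spec h0).1
    have hLlen : s + sl.length ≤ t.length := by
      have := hpre.length_le; simp only [List.length_drop] at this; omega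
    have hjne : ¬(((s : Nat) : Int) = -1) := by omega
    simp only [hi, if_neg hjne, Nat.zero_add,
      PySem.Chars.findFrom_natCast t pvKwMarker s hjle]
    rw [pv_scan1_eq t sl new_primary new_secondary text s s 0,
        Nat.max_eq_right (Nat.le_add_right s sl.length)]
    unfold pvRHS1
    by_cases h2 : PySem.Chars.find (t.drop s) pvKwMarker = -1
    · simp [h2]
    · have hk0 : 0 ≤ PySem.Chars.find (t.drop s) pvKwMarker := by
        have := PySem.Chars.neg_one_le_find (t.drop s) pvKwMarker; omega
      set kk := (PySem.Chars.find (t.drop s) pvKwMarker).toNat with hkkdef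
      have hki : PySem.Chars.find (t.drop s) pvKwMarker = (kk : Int) := (Int.toNat_of_nonneg hk0).symm
      have hkkle : s + kk ≤ t.length := by
        have := PySem.Chars.find_le_length (t.drop s) pvKwMarker
        simp only [List.length_drop] at this; omega
      simp only [hki, if_neg (show ¬((kk : Nat) : Int) = -1 by omega),
        if_neg (show ¬(((s : Nat) : Int) + ((kk : Nat) : Int) = -1) by omega)]
      rw [← Nat.cast_add s sl.length, ← Nat.cast_add s kk]
      simp only [PySem.Chars.findFrom_natCast t pvSlugPrefix (s + sl.length) hLlen,
        PySem.Chars.findFrom_natCast t pvTermMarker (s + kk) hkkle]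
      set n := PySem.Chars.find (t.drop (s + sl.length)) pvSlugPrefix with hndef
      have hn := PySem.Chars.neg_one_le_find (t.drop (s + sl.length)) pvSlugPrefix
      have hguard : ((if n = -1 then (-1 : Int) else ((s + sl.length : Nat) : Int) + n) ≠ -1 ∧
          (((s + kk : Nat) : Int)) >
            (if n = -1 then (-1 : Int) else ((s + sl.length : Nat) : Int) + n))
          ↔ (n ≠ -1 ∧ s + sl.length + n.toNat < s + kk) := by
        by_cases hn1 : n = -1
        · simp [hn1]
        · simp [hn1]; omega
      by_cases h3 : n ≠ -1 ∧ s + sl.length + n.toNat < s + kk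
      · rw [if_pos (hguard.2 h3), if_pos h3]
      · rw [if_neg (fun hh => h3 (hguard.1 hh)), if_neg h3,
            pv_scan2_eq t sl new_primary new_secondary text (s + kk) s (s + kk)]
        unfold pvRHS2
        by_cases h4 : PySem.Chars.find (t.drop (s + kk)) pvTermMarker = -1
        · simp [h4]
        · have ht0 : 0 ≤ PySem.Chars.find (t.drop (s + kk)) pvTermMarker := by
            have := PySem.Chars.neg_one_le_find (t.drop (s + kk)) pvTermMarker; omega
          set tt := (PySem.Chars.find (t.drop (s + kk)) pvTermMarker).toNat with httdef
          have hti : PySem.Chars.find (t.drop (s + kk)) pvTermMarker = (tt : Int) :=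
            (Int.toNat_of_nonneg ht0).symm
          simp only [hti, if_neg (show ¬((tt : Nat) : Int) = -1 by omega),
            if_neg (show ¬(((s + kk : Nat) : Int) + ((tt : Nat) : Int) = -1) by omega)]
          rw [show (((s + kk : Nat) : Int) + ((tt : Nat) : Int) + 8)
                = (((s + kk + tt + 8 : Nat)) : Int) from by push_cast; ring,
              show List.map (fun kw => "      ".toList ++ pvJsString kw.toList)
                  (new_primary :: new_secondary)
                  = List.map (fun kw => "      ".toList ++ pvJsString kw)
                      (new_primary.toList :: List.map String.toList new_secondary) from by
                simp [List.map_map, Function.comp],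
              pv_block_eq new_primary.toList (List.map String.toList new_secondary)]

-- ===== VERDICT (by name: the statement is the Claim_ definition above) =====
theorem update_posts_ts_keywords_spec : Claim_equal_update_posts_ts_keywords := by
  intro text slug np ns _
  exact pv_main text slug np ns
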